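-- pv_equiv track=rewrite | github.com/NicBrito/cacapalavras | main.py | checar_palavra_existente_na_matriz
-- ===== SOURCE A (Python) =====
-- def checar_palavra_existente_na_matriz(matriz, direcao, tamanho_palavra, linha_palavra, coluna_palavra):
--     palavra_existente_na_posicao = [] # criando variável para armazenar a palavra que já existe na posição
--     for indice in range(0, tamanho_palavra): # percorrendo a quantidade de letras da palavra
--         if(matriz[linha_palavra][coluna_palavra] == ""): # caso a posição da matriz seja um vazio
--             palavra_existente_na_posicao.append("_") # adicionando um underline na variável
--         else: # caso a posição da matriz não seja um vazio
--             palavra_existente_na_posicao.append(matriz[linha_palavra][coluna_palavra]) # adicionando a letra existente na variável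
--         if(direcao == "horizontal"): # caso a direção seja horizontal
--             coluna_palavra += 1 # selecionado próxima coluna para pegar a próxima letra da palavra
--         elif(direcao == "vertical"): # caso a direção seja vertical
--             linha_palavra += 1 # selecionado próxima linha para pegar a próxima letra da palavra
--         elif(direcao == "diagonal para direita"): # caso a direção seja diagonal para a direita
--             linha_palavra += 1 # selecionado próxima linha para pegar a próxima letra da palavra
--             coluna_palavra += 1 # selecionado próxima coluna para pegar a próxima letra da palavra
--         elif(direcao == "diagonal para esquerda"): # caso a direção seja diagonal para a esquerda
--             linha_palavra += 1 # selecionado próxima linha para pegar a próxima letra da palavra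
--             coluna_palavra -= 1 # selecionado próxima coluna para pegar a próxima letra da palavra
--     return palavra_existente_na_posicao # retornando a palavra que já existe na posição
-- ===== SOURCE B (Python) =====
-- def checar_palavra_existente_na_matriz(matriz, direcao, tamanho_palavra, linha_palavra, coluna_palavra):
--     # divide-and-conquer: a segment of length n is the concatenation of its two halves
--     passo = {
--         "horizontal": (0, 1),
--         "vertical": (1, 0),
--         "diagonal para direita": (1, 1),
--         "diagonal para esquerda": (1, -1),
--     }.get(direcao, (0, 0))
--
--     def segmento(n, l, c):
--         if n <= 0:
--             return []
--         if n == 1: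
--             celula = matriz[l][c]
--             return ["_" if celula == "" else celula]
--         m = n // 2
--         return segmento(m, l, c) + segmento(n - m, l + m * passo[0], c + m * passo[1])
--
--     return segmento(tamanho_palavra, linha_palavra, coluna_palavra)
-- ===== Notes on version B (the rewrite author's own statement) =====
-- stated objective: alternative
-- what changed: B builds the segment by divide-and-conquer (split the length in half, recurse on each half at an offset computed from a one-time step vector, concatenate), instead of A's single linear loop that mutates coordinates through a per-iteration direction branch chain.
import Mathlib
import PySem

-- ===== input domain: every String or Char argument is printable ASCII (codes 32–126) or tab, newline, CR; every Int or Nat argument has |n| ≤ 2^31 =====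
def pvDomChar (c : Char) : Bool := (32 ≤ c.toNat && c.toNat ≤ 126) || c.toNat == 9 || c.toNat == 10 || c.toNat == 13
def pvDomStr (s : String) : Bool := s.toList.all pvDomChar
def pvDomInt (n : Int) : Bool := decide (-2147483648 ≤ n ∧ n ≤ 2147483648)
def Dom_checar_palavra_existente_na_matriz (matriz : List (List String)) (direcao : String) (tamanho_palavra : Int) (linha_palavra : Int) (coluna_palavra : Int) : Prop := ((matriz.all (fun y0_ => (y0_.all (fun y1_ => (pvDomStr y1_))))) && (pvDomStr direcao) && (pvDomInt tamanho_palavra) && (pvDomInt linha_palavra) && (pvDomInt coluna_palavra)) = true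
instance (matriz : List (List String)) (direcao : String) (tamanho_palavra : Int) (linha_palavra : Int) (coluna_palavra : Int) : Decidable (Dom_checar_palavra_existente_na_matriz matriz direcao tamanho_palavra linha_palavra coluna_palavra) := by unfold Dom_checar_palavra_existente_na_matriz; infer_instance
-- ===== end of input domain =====

-- ===== PORT A =====
-- B builds the segment by divide-and-conquer on the length instead of A's linear loop with a
-- per-iteration direction branch mutating the coordinates; objective: alternative decomposition.
-- pvCell: matriz[l][c] with Python index semantics; exact wherever the access is in range (Pre_
-- guarantees that; outside Pre_ the Python raises IndexError and nothing is claimed).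
def pvCell (matriz : List (List String)) (l c : Int) : String :=
  ((PySem.List.pyGet? matriz l).bind (fun row => PySem.List.pyGet? row c)).getD ""

def pvEntry (matriz : List (List String)) (l c : Int) : String :=
  let celula := pvCell matriz l c
  if celula = "" then "_" else celula

def pvGoA (matriz : List (List String)) (direcao : String) : Nat → Int → Int → List String
  | 0, _, _ => []
  | Nat.succ n, l, c =>
    let next :=
      if direcao = "horizontal" then (l, c + 1)
      else if direcao = "vertical" then (l + 1, c)
      else if direcao = "diagonal para direita" then (l + 1, c + 1)
      else if direcao = "diagonal para esquerda" then (l + 1, c - 1)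
      else (l, c)
    pvEntry matriz l c :: pvGoA matriz direcao n next.1 next.2

def checar_palavra_existente_na_matriz (matriz : List (List String)) (direcao : String) (tamanho_palavra : Int) (linha_palavra : Int) (coluna_palavra : Int) : List String :=
  pvGoA matriz direcao tamanho_palavra.toNat linha_palavra coluna_palavra

-- ===== PORT B =====
def pvDelta (direcao : String) : Int × Int :=
  if direcao = "horizontal" then (0, 1)
  else if direcao = "vertical" then (1, 0)
  else if direcao = "diagonal para direita" then (1, 1)
  else if direcao = "diagonal para esquerda" then (1, -1)
  else (0, 0)

-- half of a length ≥ 2 is a proper nonempty part (used for pvSeg's termination)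
theorem pvHalf (n : Int) (h : 2 ≤ n) :
    1 ≤ PySem.Int.floordiv n 2 ∧ PySem.Int.floordiv n 2 < n := by
  rw [PySem.Int.floordiv_eq_ediv_of_pos (by omega)]; omega

-- segmento from Source B: divide and conquer on the length
def pvSeg (matriz : List (List String)) (dl dc : Int) (n l c : Int) : List String :=
  if n ≤ 0 then []
  else if n = 1 then [pvEntry matriz l c]
  else
    pvSeg matriz dl dc (PySem.Int.floordiv n 2) l c ++
    pvSeg matriz dl dc (n - PySem.Int.floordiv n 2)
      (l + PySem.Int.floordiv n 2 * dl) (c + PySem.Int.floordiv n 2 * dc)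
termination_by n.toNat
decreasing_by
  · have := pvHalf n (by omega); omega
  · have := pvHalf n (by omega); omega

def checar_palavra_existente_na_matriz_alt (matriz : List (List String)) (direcao : String) (tamanho_palavra : Int) (linha_palavra : Int) (coluna_palavra : Int) : List String :=
  let passo := pvDelta direcao
  pvSeg matriz passo.1 passo.2 tamanho_palavra linha_palavra coluna_palavra

-- ===== PRECONDITION & SPEC =====
-- pvIdxOk: Python index validity (negative wraparound allowed): -len <= i < len
def pvIdxOk (len : Nat) (i : Int) : Bool := decide (-(len : Int) ≤ i ∧ i < (len : Int))

-- cell access matriz[r][c] is valid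
def pvColOk (matriz : List (List String)) (r c : Int) : Bool :=
  match PySem.List.pyGet? matriz r with
  | none => false
  | some row => pvIdxOk row.length c

-- Pre_ excludes exactly the inputs on which A (and B) raise IndexError: some visited cell out of
-- range.  Stated as closed-form bounds checks: row/column index ranges are monotone intervals, so
-- endpoint checks suffice; only for row-moving directions (ragged rows) a per-visited-row column
-- check remains, guarded by the row-endpoint check which bounds the number of visited rows by the
-- matrix height.
def pvPreB (matriz : List (List String)) (direcao : String) (tamanho_palavra linha_palavra coluna_palavra : Int) : Bool :=
  let d := pvDelta direcao
  if tamanho_palavra ≤ 0 then true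
  else if d.1 = 0 then
    -- one row, columns form a monotone interval: endpoints suffice
    pvColOk matriz linha_palavra coluna_palavra &&
    pvColOk matriz linha_palavra (coluna_palavra + (tamanho_palavra - 1) * d.2)
  else
    -- rows linha..linha+t-1: endpoint check first (bounds t by the matrix height), then per row
    if pvIdxOk matriz.length linha_palavra &&
       pvIdxOk matriz.length (linha_palavra + tamanho_palavra - 1) then
      (List.range tamanho_palavra.toNat).all (fun k =>
        pvColOk matriz (linha_palavra + (k : Int)) (coluna_palavra + (k : Int) * d.2))
    else false

def Pre_checar_palavra_existente_na_matriz (matriz : List (List String)) (direcao : String) (tamanho_palavra : Int) (linha_palavra : Int) (coluna_palavra : Int) : Prop :=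
  pvPreB matriz direcao tamanho_palavra linha_palavra coluna_palavra = true
instance (matriz : List (List String)) (direcao : String) (tamanho_palavra : Int) (linha_palavra : Int) (coluna_palavra : Int) : Decidable (Pre_checar_palavra_existente_na_matriz matriz direcao tamanho_palavra linha_palavra coluna_palavra) := by unfold Pre_checar_palavra_existente_na_matriz; infer_instance

def pvWitness_checar_palavra_existente_na_matriz : List (List String) × String × Int × Int × Int :=
  ([["a", ""], ["c", "d"]], "horizontal", 2, 0, 0)

def Spec_checar_palavra_existente_na_matriz (matriz : List (List String)) (direcao : String) (tamanho_palavra : Int) (linha_palavra : Int) (coluna_palavra : Int) (out : List String) : Prop := out = checar_palavra_existente_na_matriz_alt matriz direcao tamanho_palavra linha_palavra coluna_palavra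
instance (matriz : List (List String)) (direcao : String) (tamanho_palavra : Int) (linha_palavra : Int) (coluna_palavra : Int) (out : List String) : Decidable (Spec_checar_palavra_existente_na_matriz matriz direcao tamanho_palavra linha_palavra coluna_palavra out) := by unfold Spec_checar_palavra_existente_na_matriz; infer_instance

-- ===== CLAIM (what is proved, stated in full; the proofs are below) =====
def Claim_equal_checar_palavra_existente_na_matriz : Prop := ∀ (matriz : List (List String)) (direcao : String) (tamanho_palavra : Int) (linha_palavra : Int) (coluna_palavra : Int), Dom_checar_palavra_existente_na_matriz matriz direcao tamanho_palavra linha_palavra coluna_palavra → Pre_checar_palavra_existente_na_matriz matriz direcao tamanho_palavra linha_palavra coluna_palavra → Spec_checar_palavra_existente_na_matriz matriz direcao tamanho_palavra linha_palavra coluna_palavra (checar_palavra_existente_na_matriz matriz direcao tamanho_palavra linha_palavra coluna_palavra)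

-- ===== LEMMAS AND PROOFS =====
theorem pvWitness_ok : Dom_checar_palavra_existente_na_matriz pvWitness_checar_palavra_existente_na_matriz.1 pvWitness_checar_palavra_existente_na_matriz.2.1 pvWitness_checar_palavra_existente_na_matriz.2.2.1 pvWitness_checar_palavra_existente_na_matriz.2.2.2.1 pvWitness_checar_palavra_existente_na_matriz.2.2.2.2 ∧ Pre_checar_palavra_existente_na_matriz pvWitness_checar_palavra_existente_na_matriz.1 pvWitness_checar_palavra_existente_na_matriz.2.1 pvWitness_checar_palavra_existente_na_matriz.2.2.1 pvWitness_checar_palavra_existente_na_matriz.2.2.2.1 pvWitness_checar_palavra_existente_na_matriz.2.2.2.2 := by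
  decide

-- A's per-step coordinate update equals adding pvDelta, for every direction string.
theorem pvStep_eq (direcao : String) (l c : Int) :
    (if direcao = "horizontal" then (l, c + 1)
      else if direcao = "vertical" then (l + 1, c)
      else if direcao = "diagonal para direita" then (l + 1, c + 1)
      else if direcao = "diagonal para esquerda" then (l + 1, c - 1)
      else (l, c)) = (l + (pvDelta direcao).1, c + (pvDelta direcao).2) := by
  unfold pvDelta
  split_ifs <;> (first | rfl | (simp; omega) | simp)

theorem pvGoA_eq_map (matriz : List (List String)) (direcao : String) :
    ∀ (n : Nat) (l c : Int),
      pvGoA matriz direcao n l c =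
        (List.range n).map (fun (k : Nat) =>
          pvEntry matriz (l + (k : Int) * (pvDelta direcao).1) (c + (k : Int) * (pvDelta direcao).2)) := by
  intro n
  induction n with
  | zero => intro l c; simp [pvGoA]
  | succ n ih =>
    intro l c
    simp only [pvGoA]
    rw [pvStep_eq, ih, List.range_succ_eq_map, List.map_cons, List.map_map]
    congr 1
    · simp
    · refine List.map_congr_left (fun k _ => ?_)
      simp only [Function.comp_apply]
      congr 1 <;> push_cast <;> ring

-- B's divide-and-conquer segment computes the same closed-form map.
theorem pvSeg_eq_map (matriz : List (List String)) (dl dc : Int) :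
    ∀ (n l c : Int),
      pvSeg matriz dl dc n l c =
        (List.range n.toNat).map (fun (k : Nat) =>
          pvEntry matriz (l + (k : Int) * dl) (c + (k : Int) * dc)) := by
  intro n l c
  fun_induction pvSeg matriz dl dc n l c with
  | case1 n l c h =>
    have : n.toNat = 0 := by omega
    simp [this]
  | case2 l c h =>
    simp
  | case3 n l c h h1 ih1 ih2 =>
    have hm := pvHalf n (by omega)
    set M := PySem.Int.floordiv n 2 with hM
    rw [ih1, ih2]
    rw [show n.toNat = M.toNat + (n - M).toNat by omega, List.range_add,
      List.map_append, List.map_map]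
    congr 1
    refine List.map_congr_left (fun k _ => ?_)
    simp only [Function.comp_apply]
    have hMc : ((M.toNat + k : Nat) : Int) = M + (k : Int) := by push_cast; omega
    rw [hMc]
    congr 1 <;> ring

-- ===== VERDICT (by name: the statement is the Claim_ definition above) =====
theorem checar_palavra_existente_na_matriz_spec : Claim_equal_checar_palavra_existente_na_matriz := by
  intro matriz direcao t l c _ _
  unfold Spec_checar_palavra_existente_na_matriz checar_palavra_existente_na_matriz checar_palavra_existente_na_matriz_alt
  rw [pvGoA_eq_map, pvSeg_eq_map]
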